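-- pv_equiv track=rewrite | github.com/uto-lt/Learning | 4.py | max_xor_sum
-- ===== SOURCE A (Python) =====
-- def max_xor_sum(n, k, nums):
--     # 计算数组中每个元素与前缀异或的结果
--     prefix_xor = [0]
--     for num in nums:
--         prefix_xor.append(prefix_xor[-1] ^ num)
--
--     # dp[i][j] 表示将前 i 个数分割成 j 段所能得到的最大和
--     dp = [[0] * (k + 1) for _ in range(n + 1)]
--
--     for i in range(1, n + 1):
--         for j in range(1, min(i, k) + 1):
--             # 分割段数与数组下标相等时，结果即为当前位置的前缀异或和
--             if j == i:
--                 dp[i][j] = prefix_xor[i]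
--             else:
--                 # 遍历所有可能的分割位置
--                 for split in range(j - 1, i):
--                     dp[i][j] = max(dp[i][j], dp[split][j - 1] + (prefix_xor[i] ^ prefix_xor[split]))
--
--     return dp[n][k]
-- ===== SOURCE B (Python) =====
-- def max_xor_sum(n, k, nums):
--     prefix_xor = [0]
--     for num in nums:
--         prefix_xor.append(prefix_xor[-1] ^ num)
--
--     cache = {}
--
--     def f(i, j):
--         # best value for A's dp-state (i, j); states never stored in A's table are 0
--         if j <= 0 or j > i:
--             return 0
--         if j == i:
--             return prefix_xor[i]
--         key = (i, j)
--         if key not in cache: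
--             best = 0
--             for split in range(j - 1, i):
--                 cand = f(split, j - 1) + (prefix_xor[i] ^ prefix_xor[split])
--                 if cand > best:
--                     best = cand
--             cache[key] = best
--         return cache[key]
--
--     return f(n, k)
-- ===== Notes on version B (the rewrite author's own statement) =====
-- stated objective: alternative
-- what changed: Replaces the bottom-up (n+1)x(k+1) DP table with a top-down memoized recursion f(i,j) that only visits reachable states, so no table is allocated and unread cells (j > min(i,k)) are never computed.
import Mathlib
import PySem

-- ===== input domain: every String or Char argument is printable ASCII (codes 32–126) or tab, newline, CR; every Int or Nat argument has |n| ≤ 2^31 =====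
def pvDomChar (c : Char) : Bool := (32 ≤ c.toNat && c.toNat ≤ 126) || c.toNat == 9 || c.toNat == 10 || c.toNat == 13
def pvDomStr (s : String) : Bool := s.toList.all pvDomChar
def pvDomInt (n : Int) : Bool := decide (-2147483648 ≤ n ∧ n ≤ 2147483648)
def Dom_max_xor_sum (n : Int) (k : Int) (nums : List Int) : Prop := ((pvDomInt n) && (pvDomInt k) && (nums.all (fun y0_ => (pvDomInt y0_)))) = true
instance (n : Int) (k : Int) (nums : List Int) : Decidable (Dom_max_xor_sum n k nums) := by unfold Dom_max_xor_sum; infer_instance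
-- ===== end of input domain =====

-- B replaces A's bottom-up DP table with a top-down memoized recursion over the same states (alternative decomposition, same values).

-- ===== PORT A =====
-- prefix_xor = [0]; for num in nums: prefix_xor.append(prefix_xor[-1] ^ num)   (both Pythons build it verbatim)
def pvPrefixXor (nums : List Int) : List Int :=
  nums.foldl (fun pre num => pre ++ [PySem.Int.bxor (PySem.List.pyGetD pre (-1) 0) num]) [0]

-- dp[a][b]  (in range under Pre_)
def pvGet2 (dp : List (List Int)) (a b : Int) : Int :=
  PySem.List.pyGetD (PySem.List.pyGetD dp a []) b 0

-- dp[a][b] = v  (in range under Pre_)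
def pvSet2 (dp : List (List Int)) (a b v : Int) : List (List Int) :=
  PySem.List.pySetD dp a (PySem.List.pySetD (PySem.List.pyGetD dp a []) b v)

-- body of A's j-loop (the branch on j == i, and the split-loop)
def pvJBody (px : List Int) (i : Int) (dp : List (List Int)) (j : Int) : List (List Int) :=
  if j = i then pvSet2 dp i j (PySem.List.pyGetD px i 0)
  else (PySem.List.pyRange (j - 1) i 1).foldl (fun dp split =>
    pvSet2 dp i j (max (pvGet2 dp i j)
      (pvGet2 dp split (j - 1) + PySem.Int.bxor (PySem.List.pyGetD px i 0) (PySem.List.pyGetD px split 0)))) dp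

-- body of A's outer i-loop
def pvStepA (px : List Int) (k : Int) (dp : List (List Int)) (i : Int) : List (List Int) :=
  (PySem.List.pyRange 1 (min i k + 1) 1).foldl (pvJBody px i) dp

def max_xor_sum (n : Int) (k : Int) (nums : List Int) : Int :=
  let px := pvPrefixXor nums
  let dp0 := (PySem.List.pyRange 0 (n + 1) 1).map (fun _ => PySem.List.pyRepeat [(0 : Int)] (k + 1))
  let dp := (PySem.List.pyRange 1 (n + 1) 1).foldl (pvStepA px k) dp0
  pvGet2 dp n k

-- ===== PORT B =====
-- the memoized recursion f(i, j) of Source B; the cache only memoizes, so it is ported as plain recursion on j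
def pvF (px : List Int) (i : Int) (j : Int) : Int :=
  if h : j ≤ 0 ∨ j > i then 0
  else if j = i then PySem.List.pyGetD px i 0
  else (PySem.List.pyRange (j - 1) i 1).foldl (fun best split =>
    if pvF px split (j - 1) + PySem.Int.bxor (PySem.List.pyGetD px i 0) (PySem.List.pyGetD px split 0) > best
    then pvF px split (j - 1) + PySem.Int.bxor (PySem.List.pyGetD px i 0) (PySem.List.pyGetD px split 0)
    else best) 0
termination_by j.toNat
decreasing_by omega

def max_xor_sum_alt (n : Int) (k : Int) (nums : List Int) : Int :=
  pvF (pvPrefixXor nums) n k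

-- ===== PRECONDITION & SPEC =====
-- Excludes exactly the inputs where the Python A raises IndexError: n < 0 or k < 0 (dp[n] / dp[n][k] out of range),
-- or k ≥ 1 with n > len(nums) (prefix_xor[i] is then read out of range). Elsewhere A returns normally.
def Pre_max_xor_sum (n : Int) (k : Int) (nums : List Int) : Prop :=
  0 ≤ n ∧ 0 ≤ k ∧ (k = 0 ∨ n ≤ (nums.length : Int))
instance (n : Int) (k : Int) (nums : List Int) : Decidable (Pre_max_xor_sum n k nums) := by
  unfold Pre_max_xor_sum; infer_instance
def pvWitness_max_xor_sum : Int × Int × List Int := (3, 2, [5, 1, 7])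

def Spec_max_xor_sum (n : Int) (k : Int) (nums : List Int) (out : Int) : Prop := out = max_xor_sum_alt n k nums
instance (n : Int) (k : Int) (nums : List Int) (out : Int) : Decidable (Spec_max_xor_sum n k nums out) := by unfold Spec_max_xor_sum; infer_instance

-- ===== CLAIM (what is proved, stated in full; the proofs are below) =====
def Claim_equal_max_xor_sum : Prop := ∀ (n : Int) (k : Int) (nums : List Int), Dom_max_xor_sum n k nums → Pre_max_xor_sum n k nums → Spec_max_xor_sum n k nums (max_xor_sum n k nums)

-- ===== LEMMAS AND PROOFS =====

theorem pvF_nonpos (px : List Int) (i j : Int) (h : j ≤ 0) : pvF px i j = 0 := by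
  rw [pvF, dif_pos (Or.inl h)]

theorem pvF_gt (px : List Int) (i j : Int) (h : j > i) : pvF px i j = 0 := by
  rw [pvF, dif_pos (Or.inr h)]

-- ----- a function model of A's table, for the proofs -----

def pvUpdF (dp : Int → Int → Int) (i j v : Int) : Int → Int → Int :=
  fun a b => if a = i ∧ b = j then v else dp a b

def pvJBodyF (px : List Int) (i : Int) (dp : Int → Int → Int) (j : Int) : Int → Int → Int :=
  if j = i then pvUpdF dp i j (PySem.List.pyGetD px i 0)
  else (PySem.List.pyRange (j - 1) i 1).foldl (fun dp split =>
    pvUpdF dp i j (max (dp i j)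
      (dp split (j - 1) + PySem.Int.bxor (PySem.List.pyGetD px i 0) (PySem.List.pyGetD px split 0)))) dp

def pvStepAF (px : List Int) (k : Int) (dp : Int → Int → Int) (i : Int) : Int → Int → Int :=
  (PySem.List.pyRange 1 (min i k + 1) 1).foldl (pvJBodyF px i) dp

-- the table A maintains after m outer iterations, as a closed form in terms of pvF
def pvTab (px : List Int) (k m : Int) : Int → Int → Int :=
  fun a b => if 1 ≤ b ∧ b ≤ min a k ∧ a ≤ m then pvF px a b else 0

-- ----- list table ↔ function model -----

def pvMkDp (f : Int → Int → Int) (n k : Int) : List (List Int) :=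
  (PySem.List.pyRange 0 (n + 1) 1).map (fun a => (PySem.List.pyRange 0 (k + 1) 1).map (f a))

theorem pvGet2_mk (f : Int → Int → Int) (n k a b : Int)
    (ha0 : 0 ≤ a) (han : a ≤ n) (hb0 : 0 ≤ b) (hbk : b ≤ k) :
    pvGet2 (pvMkDp f n k) a b = f a b := by
  unfold pvGet2 pvMkDp
  rw [PySem.List.pyGetD_map_pyRange_of_nonneg _ _ _ _ ha0 (by omega)]
  rw [PySem.List.pyGetD_map_pyRange_of_nonneg _ _ _ _ hb0 (by omega)]

theorem pvSet2_mk (f : Int → Int → Int) (n k i j v : Int)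
    (hi0 : 0 ≤ i) (hin : i ≤ n) (hj0 : 0 ≤ j) (hjk : j ≤ k) :
    pvSet2 (pvMkDp f n k) i j v = pvMkDp (pvUpdF f i j v) n k := by
  unfold pvSet2 pvMkDp
  rw [PySem.List.pyGetD_map_pyRange_of_nonneg _ _ _ _ hi0 (by omega)]
  rw [PySem.List.pySetD_of_nonneg _ _ hj0, PySem.List.pySetD_of_nonneg _ _ hi0]
  apply List.ext_getElem
  · simp [PySem.List.length_pyRange_one]
  intro a h1 h2
  rw [List.getElem_set]
  simp only [List.getElem_map, PySem.List.getElem_pyRange_one]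
  by_cases hai : i.toNat = a
  · rw [if_pos hai]
    have hia : (0 : Int) + (a : Int) = i := by omega
    rw [hia]
    apply List.ext_getElem
    · simp [PySem.List.length_pyRange_one]
    intro b h3 h4
    rw [List.getElem_set]
    simp only [List.getElem_map, PySem.List.getElem_pyRange_one]
    unfold pvUpdF
    by_cases hbj : j.toNat = b
    · rw [if_pos hbj, if_pos ⟨rfl, by omega⟩]
    · rw [if_neg hbj, if_neg (by rintro ⟨-, hh⟩; omega)]
  · rw [if_neg hai]
    apply List.ext_getElem
    · simp
    intro b h3 h4
    simp only [List.getElem_map, PySem.List.getElem_pyRange_one]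
    unfold pvUpdF
    rw [if_neg (by rintro ⟨hh, -⟩; omega)]

theorem foldl_mk (n k : Int) (L : List Int)
    (step : List (List Int) → Int → List (List Int))
    (stepF : (Int → Int → Int) → Int → (Int → Int → Int))
    (h : ∀ (f : Int → Int → Int), ∀ x ∈ L, step (pvMkDp f n k) x = pvMkDp (stepF f x) n k) :
    ∀ (f0 : Int → Int → Int), L.foldl step (pvMkDp f0 n k) = pvMkDp (L.foldl stepF f0) n k := by
  induction L with
  | nil => intro f0; rfl
  | cons s L ih =>
    intro f0
    simp only [List.foldl_cons]
    rw [h f0 s List.mem_cons_self]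
    exact ih (fun f x hx => h f x (List.mem_cons_of_mem s hx)) (stepF f0 s)

-- the split-loop, the j-loop and the i-loop of the list port track the function model
theorem jbody_mk (px : List Int) (n k i : Int) (hi1 : 1 ≤ i) (hin : i ≤ n)
    (f : Int → Int → Int) (j : Int) (hj : j ∈ PySem.List.pyRange 1 (min i k + 1) 1) :
    pvJBody px i (pvMkDp f n k) j = pvMkDp (pvJBodyF px i f j) n k := by
  rw [PySem.List.mem_pyRange_one] at hj
  unfold pvJBody pvJBodyF
  by_cases hij : j = i
  · rw [if_pos hij, if_pos hij, pvSet2_mk f n k i j _ (by omega) hin (by omega) (by omega)]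
  · rw [if_neg hij, if_neg hij]
    apply foldl_mk n k
    intro g s hs
    rw [PySem.List.mem_pyRange_one] at hs
    rw [pvGet2_mk g n k i j (by omega) hin (by omega) (by omega)]
    rw [pvGet2_mk g n k s (j - 1) (by omega) (by omega) (by omega) (by omega)]
    rw [pvSet2_mk g n k i j _ (by omega) hin (by omega) (by omega)]

theorem stepA_mk (px : List Int) (n k : Int) (f : Int → Int → Int) (i : Int)
    (hi : i ∈ PySem.List.pyRange 1 (n + 1) 1) :
    pvStepA px k (pvMkDp f n k) i = pvMkDp (pvStepAF px k f i) n k := by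
  rw [PySem.List.mem_pyRange_one] at hi
  unfold pvStepA pvStepAF
  apply foldl_mk n k
  intro g j hj
  exact jbody_mk px n k i (by omega) (by omega) g j hj

theorem dp0_mk (n k : Int) :
    (PySem.List.pyRange 0 (n + 1) 1).map (fun _ => PySem.List.pyRepeat [(0 : Int)] (k + 1))
    = pvMkDp (fun _ _ => 0) n k := by
  unfold pvMkDp
  apply List.map_congr_left
  intro a _
  rw [PySem.List.pyRepeat_singleton]
  rw [List.map_const', PySem.List.length_pyRange_one]
  congr 1
  omega

-- ----- the function model computes pvF (the old table argument) -----

theorem updF_self (dp : Int → Int → Int) (i j : Int) : pvUpdF dp i j (dp i j) = dp := by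
  funext a b; simp only [pvUpdF]
  split
  · rename_i h; rw [h.1, h.2]
  · rfl

theorem split_loop_closed (px : List Int) (T : Int → Int → Int) (i j : Int) :
    ∀ (L : List Int) (v : Int),
      L.foldl (fun dp split => pvUpdF dp i j (max (dp i j)
          (dp split (j - 1) + PySem.Int.bxor (PySem.List.pyGetD px i 0) (PySem.List.pyGetD px split 0))))
        (pvUpdF T i j v)
      = pvUpdF T i j (L.foldl (fun best split => max best
          (T split (j - 1) + PySem.Int.bxor (PySem.List.pyGetD px i 0) (PySem.List.pyGetD px split 0))) v) := by
  intro L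
  induction L with
  | nil => intro v; rfl
  | cons s L ih =>
    intro v
    have h1 : (pvUpdF T i j v) i j = v := by simp [pvUpdF]
    have h2 : (pvUpdF T i j v) s (j - 1) = T s (j - 1) := by
      simp only [pvUpdF]
      have hne : ¬ (s = i ∧ j - 1 = j) := by rintro ⟨_, h⟩; omega
      rw [if_neg hne]
    simp only [List.foldl_cons, h1, h2]
    have h3 : pvUpdF (pvUpdF T i j v) i j (max v (T s (j - 1) + PySem.Int.bxor (PySem.List.pyGetD px i 0) (PySem.List.pyGetD px s 0)))
        = pvUpdF T i j (max v (T s (j - 1) + PySem.Int.bxor (PySem.List.pyGetD px i 0) (PySem.List.pyGetD px s 0))) := by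
      funext a b; simp only [pvUpdF]; split <;> rfl
    rw [h3, ih]

theorem foldl_max_if (px : List Int) (T : Int → Int → Int) (i j : Int) :
    ∀ (L : List Int), (∀ s ∈ L, T s (j - 1) = pvF px s (j - 1)) → ∀ (v : Int),
      L.foldl (fun best split => max best
          (T split (j - 1) + PySem.Int.bxor (PySem.List.pyGetD px i 0) (PySem.List.pyGetD px split 0))) v
      = L.foldl (fun best split =>
          if pvF px split (j - 1) + PySem.Int.bxor (PySem.List.pyGetD px i 0) (PySem.List.pyGetD px split 0) > best
          then pvF px split (j - 1) + PySem.Int.bxor (PySem.List.pyGetD px i 0) (PySem.List.pyGetD px split 0)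
          else best) v := by
  intro L
  induction L with
  | nil => intro _ v; rfl
  | cons s L ih =>
    intro hmem v
    simp only [List.foldl_cons]
    rw [hmem s List.mem_cons_self]
    have hstep : max v (pvF px s (j - 1) + PySem.Int.bxor (PySem.List.pyGetD px i 0) (PySem.List.pyGetD px s 0))
        = if pvF px s (j - 1) + PySem.Int.bxor (PySem.List.pyGetD px i 0) (PySem.List.pyGetD px s 0) > v
          then pvF px s (j - 1) + PySem.Int.bxor (PySem.List.pyGetD px i 0) (PySem.List.pyGetD px s 0)
          else v := by
      rcases le_or_gt (pvF px s (j - 1) + PySem.Int.bxor (PySem.List.pyGetD px i 0) (PySem.List.pyGetD px s 0)) v with h | h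
      · rw [max_eq_left h, if_neg (by omega)]
      · rw [max_eq_right h.le, if_pos h]
    rw [hstep, ih (fun t ht => hmem t (List.mem_cons_of_mem s ht))]

-- one cell of the inner j-loop: with rows < i correct and row i still blank from column j on, cell (i,j) gets pvF px i j
theorem step_cell (px : List Int) (k m : Int) (i j : Int)
    (hi : i = m + 1) (hj1 : 1 ≤ j) (hjle : j ≤ i) (T : Int → Int → Int)
    (hT : ∀ a b, a ≠ i → T a b = pvTab px k m a b) (hTi : ∀ b, j ≤ b → T i b = 0)
    (hjk : j ≤ k) :
    pvJBodyF px i T j = pvUpdF T i j (pvF px i j) := by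
  unfold pvJBodyF
  by_cases hij : j = i
  · subst hij
    rw [if_pos rfl, pvF, dif_neg (by omega), if_pos rfl]
  · rw [if_neg hij]
    have hji : j < i := by omega
    have hclosed := split_loop_closed px T i j (PySem.List.pyRange (j - 1) i 1) (T i j)
    rw [updF_self] at hclosed
    rw [hclosed]
    congr 1
    rw [hTi j le_rfl]
    rw [pvF, dif_neg (by omega), if_neg hij]
    apply foldl_max_if
    intro s hs
    rw [PySem.List.mem_pyRange_one] at hs
    rw [hT s (j - 1) (by omega)]
    by_cases hj2 : j = 1
    · subst hj2
      simp only [pvTab]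
      rw [if_neg (by omega), pvF_nonpos px s (1 - 1) (by omega)]
    · simp only [pvTab]
      rw [if_pos ⟨by omega, by omega, by omega⟩]

-- the j-loop fills row i = m+1 left to right with pvF values
theorem jloop_inv (px : List Int) (k m : Int) :
    ∀ (t : Nat), (t : Int) ≤ min (m + 1) k →
      (PySem.List.pyRange 1 ((t : Int) + 1) 1).foldl (pvJBodyF px (m + 1)) (pvTab px k m)
      = fun a b => if a = m + 1 ∧ 1 ≤ b ∧ b ≤ (t : Int) then pvF px (m + 1) b else pvTab px k m a b := by
  intro t
  induction t with
  | zero =>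
    intro _
    rw [PySem.List.pyRange_one_eq_nil (by omega)]
    funext a b
    simp only [List.foldl_nil]
    rw [if_neg (by omega)]
  | succ t ih =>
    intro ht
    have ht' : (t : Int) ≤ min (m + 1) k := by push_cast at ht ⊢; omega
    have hsplit : PySem.List.pyRange 1 ((t : Int) + 1 + 1) 1
        = PySem.List.pyRange 1 ((t : Int) + 1) 1 ++ [(t : Int) + 1] :=
      PySem.List.pyRange_one_succ_right (by omega)
    push_cast [hsplit]
    rw [List.foldl_append, ih ht']
    simp only [List.foldl_cons, List.foldl_nil]
    rw [step_cell px k m (m + 1) ((t : Int) + 1) rfl (by omega) (by push_cast at ht; omega)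
      (fun a b => if a = m + 1 ∧ 1 ≤ b ∧ b ≤ (t : Int) then pvF px (m + 1) b else pvTab px k m a b)
      ?hT ?hTi ?hjk]
    case hT => intro a b ha; beta_reduce; rw [if_neg (by tauto)]
    case hTi =>
      intro b hb
      beta_reduce
      rw [if_neg (by omega)]
      simp only [pvTab]
      rw [if_neg (by omega)]
    case hjk => push_cast at ht; omega
    funext a b
    by_cases hab : a = m + 1 ∧ b = (t : Int) + 1
    · obtain ⟨h1, h2⟩ := hab; subst h1; subst h2
      simp only [pvUpdF]
      rw [if_pos (by and_intros <;> first | trivial | omega), if_pos (by and_intros <;> first | trivial | omega)]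
    · simp only [pvUpdF]
      rw [if_neg hab]
      by_cases hc : a = m + 1 ∧ 1 ≤ b ∧ b ≤ (t : Int)
      · rw [if_pos hc, if_pos ⟨hc.1, hc.2.1, by omega⟩]
      · rw [if_neg hc, if_neg ?_]
        rintro ⟨h1, h2, h3⟩
        by_cases hbt : b ≤ (t : Int)
        · exact hc ⟨h1, h2, hbt⟩
        · exact hab ⟨h1, by omega⟩

-- the outer i-loop builds pvTab
theorem outer_inv (px : List Int) (k : Int) :
    ∀ (m : Nat), (PySem.List.pyRange 1 ((m : Int) + 1) 1).foldl (pvStepAF px k) (fun _ _ => 0)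
      = pvTab px k m := by
  intro m
  induction m with
  | zero =>
    rw [PySem.List.pyRange_one_eq_nil (by omega)]
    funext a b
    simp only [List.foldl_nil, pvTab]
    rw [if_neg (by omega)]
  | succ m ih =>
    have hsplit : PySem.List.pyRange 1 (((m : Nat) + 1 : Int) + 1) 1
        = PySem.List.pyRange 1 ((m : Int) + 1) 1 ++ [(m : Int) + 1] := by
      push_cast
      exact PySem.List.pyRange_one_succ_right (by omega)
    push_cast [hsplit]
    rw [List.foldl_append, ih]
    simp only [List.foldl_cons, List.foldl_nil]
    show pvStepAF px k (pvTab px k m) ((m : Int) + 1) = pvTab px k ((m : Int) + 1)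
    unfold pvStepAF
    by_cases hk : k ≤ 0
    · rw [PySem.List.pyRange_one_eq_nil (by omega)]
      funext a b
      simp only [List.foldl_nil, pvTab]
      by_cases h1 : 1 ≤ b ∧ b ≤ min a k ∧ a ≤ (m : Int)
      · rw [if_pos h1, if_pos ⟨h1.1, h1.2.1, by omega⟩]
      · rw [if_neg h1, if_neg (by omega)]
    · have hcast : ((min ((m : Int) + 1) k).toNat : Int) = min ((m : Int) + 1) k := by omega
      rw [← hcast, jloop_inv px k m (min ((m : Int) + 1) k).toNat (by omega)]
      funext a b
      simp only [pvTab, hcast]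
      by_cases ha : a = (m : Int) + 1
      · subst ha
        by_cases hb : 1 ≤ b ∧ b ≤ min ((m : Int) + 1) k
        · rw [if_pos ⟨rfl, hb.1, hb.2⟩, if_pos ⟨hb.1, hb.2, by omega⟩]
        · rw [if_neg (by tauto), if_neg (by omega), if_neg (by omega)]
      · rw [if_neg (by tauto)]
        by_cases hb : 1 ≤ b ∧ b ≤ min a k ∧ a ≤ (m : Int)
        · rw [if_pos hb, if_pos ⟨hb.1, hb.2.1, by omega⟩]
        · rw [if_neg hb, if_neg (by omega)]

-- ===== VERDICT (by name: the statement is the Claim_ definition above) =====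
theorem max_xor_sum_spec : Claim_equal_max_xor_sum := by
  intro n k nums _ hpre
  obtain ⟨hn, hk, _⟩ := hpre
  unfold Spec_max_xor_sum max_xor_sum max_xor_sum_alt
  simp only []
  rw [dp0_mk n k]
  rw [foldl_mk n k (PySem.List.pyRange 1 (n + 1) 1) (pvStepA (pvPrefixXor nums) k)
      (pvStepAF (pvPrefixXor nums) k)
      (fun f i hi => stepA_mk (pvPrefixXor nums) n k f i hi) (fun _ _ => 0)]
  rw [pvGet2_mk _ n k n k hn le_rfl hk le_rfl]
  have hmn : ((n.toNat : Nat) : Int) = n := by omega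
  rw [← hmn]
  rw [outer_inv (pvPrefixXor nums) k n.toNat]
  simp only [pvTab]
  by_cases hc : 1 ≤ k ∧ k ≤ min ((n.toNat : Nat) : Int) k ∧ ((n.toNat : Nat) : Int) ≤ ((n.toNat : Nat) : Int)
  · rw [if_pos hc]
  · rw [if_neg hc]
    by_cases hk0 : k = 0
    · rw [hk0, pvF_nonpos _ _ _ (by omega)]
    · rw [pvF_gt _ _ _ (by omega)]
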